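-- pv_equiv track=rewrite | github.com/taylorperkins/foobar | logic/prepare_the_bunnies_escape.py | answer
-- ===== SOURCE A (Python) =====
-- from collections import deque
--
-- def get_siblings(maze, maze_width_minus_one, maze_length_minus_one, node):
--     neighbors = deque()
--
--     row, col, can_destroy = node[:3]
--
--     # For x, we know that if the val is greater than 0, or less than maze length minus one, it is safe to access the
--     # val from the map
--     if row > 0:
--         wall = maze[row - 1][col] == 1
--         if wall:
--             if can_destroy:
--                 neighbors.appendleft((row - 1, col, False))
--         else:
--             neighbors.appendleft((row - 1, col, can_destroy))
--
--     if row < maze_length_minus_one: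
--         wall = maze[row + 1][col] == 1
--         if wall:
--             if can_destroy:
--                 neighbors.appendleft((row + 1, col, False))
--         else:
--             neighbors.appendleft((row + 1, col, can_destroy))
--
--     # For y, we know that if the val is greater than 0, or less than maze width minus one, it is safe to access the
--     # val from the map
--     if col > 0:
--         wall = maze[row][col - 1] == 1
--         if wall:
--             if can_destroy:
--                 neighbors.appendleft((row, col - 1, False))
--         else:
--             neighbors.appendleft((row, col - 1, can_destroy))
--
--     if col < maze_width_minus_one:
--         wall = maze[row][col + 1] == 1
--         if wall:
--             if can_destroy:
--                 neighbors.appendleft((row, col + 1, False))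
--         else:
--             neighbors.appendleft((row, col + 1, can_destroy))
--
--     return neighbors
--
-- def answer(maze):
--     """Iterate through the maze created on init. For each node in the queue, check all it's siblings and traverse
--             through the maze until you reach the end.
--
--     :return: int() --> path length
--     """
--     maze_width_minus_one = len(maze[0]) - 1
--     maze_length_minus_one = len(maze) - 1
--
--     # Establish queue to keep track of node progress
--     queue = deque()
--     # __node = ['row', 'col', 'can_destroy']
--     queue.appendleft((0, 0, True))
--
--     log_distance = {(0, 0, True): 1}
--
--     while True:
--         # unpack the node
--         current_node = queue.pop()
--
--         # We reach the end of the map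
--         if current_node[0] == maze_length_minus_one and current_node[1] == maze_width_minus_one:
--             return log_distance[current_node]
--
--         for sibling_node in get_siblings(maze, maze_width_minus_one, maze_length_minus_one, current_node):
--             # If we havent seen this node before..
--             if sibling_node not in log_distance:
--                 # add the distance to the node
--                 log_distance[sibling_node] = log_distance[current_node] + 1
--
--                 # append new node to the queue
--                 queue.appendleft(sibling_node)
-- ===== SOURCE B (Python) =====
-- def answer(maze):
--     rows, cols = len(maze), len(maze[0])
--
--     def grow(reach):
--         out = set(reach)
--         for r, c, can in reach:
--             for nr, nc in ((r - 1, c), (r + 1, c), (r, c - 1), (r, c + 1)):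
--                 if 0 <= nr < rows and 0 <= nc < cols:
--                     if maze[nr][nc] == 1:
--                         if can:
--                             out.add((nr, nc, False))
--                     else:
--                         out.add((nr, nc, can))
--         return out
--
--     reach = {(0, 0, True)}
--     k = 1
--     while True:
--         if (rows - 1, cols - 1, True) in reach or (rows - 1, cols - 1, False) in reach:
--             return k
--         grown = grow(reach)
--         if grown == reach:
--             raise ValueError("maze is not solvable")
--         reach = grown
--         k += 1
-- ===== Notes on version B (the rewrite author's own statement) =====
-- stated objective: alternative
-- what changed: A's FIFO-queue BFS with a per-node distance dictionary is replaced by a naive reachability-fixpoint iteration: keep one set of reached (row,col,can_destroy) states, each round recompute the one-step image of the WHOLE set, and return the round counter when a goal state first appears; no queue, no frontier, no stored distances.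
-- outside the precondition, e.g. on answer([[0, 1, 1, 1], [0, 1, 1], [0, 1, 1, 1], [0, 0, 0, 0]]): A returns 7, B returns 7
import Mathlib
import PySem

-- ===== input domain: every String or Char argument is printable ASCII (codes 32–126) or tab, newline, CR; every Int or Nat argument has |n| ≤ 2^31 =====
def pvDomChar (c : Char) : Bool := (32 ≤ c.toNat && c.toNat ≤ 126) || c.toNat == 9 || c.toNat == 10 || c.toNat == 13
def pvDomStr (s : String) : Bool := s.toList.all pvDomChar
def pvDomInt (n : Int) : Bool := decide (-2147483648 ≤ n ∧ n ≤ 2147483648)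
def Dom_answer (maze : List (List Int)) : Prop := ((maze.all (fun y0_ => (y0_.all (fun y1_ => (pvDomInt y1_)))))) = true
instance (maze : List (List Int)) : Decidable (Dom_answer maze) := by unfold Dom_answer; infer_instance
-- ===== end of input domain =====

-- B replaces A's FIFO-queue BFS with a distance dictionary by a naive reachability
-- fixpoint: one set of reached states, regrown wholesale each round, plus a round
-- counter; same return value, no speed claim (B recomputes the whole image each round).

-- ===== PORT A =====

-- maze[r][c]: exact wherever the Python access succeeds (all uses are behind A's bound guards)
def pvCellA (maze : List (List Int)) (r c : Int) : Int :=
  (PySem.List.pyGet? ((PySem.List.pyGet? maze r).getD []) c).getD 0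

-- get_siblings: the deque is built with appendleft (= cons), checks in Python's order
def sibsA (maze : List (List Int)) (W L : Int) (node : Int × Int × Bool) :
    List (Int × Int × Bool) :=
  let row := node.1
  let col := node.2.1
  let can := node.2.2
  let n0 : List (Int × Int × Bool) := []
  let n1 := if row > 0 then
      (if pvCellA maze (row - 1) col = 1 then
        (if can then (row - 1, col, false) :: n0 else n0)
       else (row - 1, col, can) :: n0)
    else n0
  let n2 := if row < L then
      (if pvCellA maze (row + 1) col = 1 then
        (if can then (row + 1, col, false) :: n1 else n1)
       else (row + 1, col, can) :: n1)
    else n1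
  let n3 := if col > 0 then
      (if pvCellA maze row (col - 1) = 1 then
        (if can then (row, col - 1, false) :: n2 else n2)
       else (row, col - 1, can) :: n2)
    else n2
  let n4 := if col < W then
      (if pvCellA maze row (col + 1) = 1 then
        (if can then (row, col + 1, false) :: n3 else n3)
       else (row, col + 1, can) :: n3)
    else n3
  n4

-- body of A's sibling loop: unseen sibling gets distance log_distance[cur]+1 and is enqueued
-- (deque in FIFO pop order: appendleft = append at the right end, pop = take the head)
def pvStepA (cur : Int × Int × Bool)
    (acc : List (Int × Int × Bool) × PySem.Dict (Int × Int × Bool) Int)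
    (s : Int × Int × Bool) :
    List (Int × Int × Bool) × PySem.Dict (Int × Int × Bool) Int :=
  if acc.2.get? s = none then (acc.1 ++ [s], acc.2.insert s (acc.2.getD cur 0 + 1)) else acc

-- A's 'while True' loop; fuel only totalizes it (an empty queue is Python's IndexError → 0)
def goA (maze : List (List Int)) (W L : Int) :
    Nat → List (Int × Int × Bool) → PySem.Dict (Int × Int × Bool) Int → Int
  | _, [], _ => 0
  | fuel, cur :: q, dist =>
    if cur.1 = L ∧ cur.2.1 = W then dist.getD cur 0
    else
      let acc := (sibsA maze W L cur).foldl (pvStepA cur) (q, dist)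
      match fuel with
      | 0 => 0
      | Nat.succ f => goA maze W L f acc.1 acc.2

def answer (maze : List (List Int)) : Int :=
  let row0 := (PySem.List.pyGet? maze 0).getD []   -- maze[0]; [] only outside Pre_
  let W : Int := (row0.length : Int) - 1
  let L : Int := (maze.length : Int) - 1
  goA maze W L (4 * maze.length * row0.length + 1)
    [((0 : Int), (0 : Int), true)]
    (PySem.Dict.ofList [((((0 : Int), (0 : Int), true) : Int × Int × Bool), (1 : Int))])

-- ===== PORT B =====

def pvCellB (maze : List (List Int)) (r c : Int) : Int :=
  (PySem.List.pyGet? ((PySem.List.pyGet? maze r).getD []) c).getD 0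

-- body of grow's outer loop: add the four in-bounds moves of one state into the set
def pvGrowStep (maze : List (List Int)) (rows cols : Int)
    (out : PySem.Set (Int × Int × Bool)) (st : Int × Int × Bool) :
    PySem.Set (Int × Int × Bool) :=
  [(st.1 - 1, st.2.1), (st.1 + 1, st.2.1), (st.1, st.2.1 - 1), (st.1, st.2.1 + 1)].foldl
    (fun out p =>
      if 0 ≤ p.1 ∧ p.1 < rows ∧ 0 ≤ p.2 ∧ p.2 < cols then
        if pvCellB maze p.1 p.2 = 1 then
          (if st.2.2 then PySem.Set.add out (p.1, p.2, false) else out)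
        else PySem.Set.add out (p.1, p.2, st.2.2)
      else out) out

-- grow(reach): out = set(reach), then one pass over reach adding all one-step moves
def pvGrowB (maze : List (List Int)) (rows cols : Int)
    (reach : PySem.Set (Int × Int × Bool)) : PySem.Set (Int × Int × Bool) :=
  reach.foldl (pvGrowStep maze rows cols) (PySem.Set.ofList reach)

-- B's 'while True' loop; fuel only totalizes it (grown == reach raises in Python → 0)
def pvLoopB (maze : List (List Int)) (rows cols : Int) :
    Nat → PySem.Set (Int × Int × Bool) → Int → Int
  | fuel, reach, k =>
    if ((rows - 1, cols - 1, true) : Int × Int × Bool) ∈ reach ∨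
        ((rows - 1, cols - 1, false) : Int × Int × Bool) ∈ reach then k
    else
      let grown := pvGrowB maze rows cols reach
      if PySem.Set.equal grown reach = true then 0
      else
        match fuel with
        | 0 => 0
        | Nat.succ f => pvLoopB maze rows cols f grown (k + 1)

def answer_alt (maze : List (List Int)) : Int :=
  let row0 := (PySem.List.pyGet? maze 0).getD []   -- maze[0]; [] only outside Pre_
  let rows : Int := maze.length
  let cols : Int := row0.length
  pvLoopB maze rows cols (2 * maze.length * row0.length + 1)
    (PySem.Set.ofList [((0 : Int), (0 : Int), true)])
    1

-- ===== PRECONDITION & SPEC =====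

-- helper for Pre_: neighbours of a state in the destroy-one-wall graph (independent of the ports)
def pvNbrsP (maze : List (List Int)) (rows cols : Int) (s : Int × Int × Bool) :
    List (Int × Int × Bool) :=
  ([(s.1 - 1, s.2.1), (s.1 + 1, s.2.1), (s.1, s.2.1 - 1), (s.1, s.2.1 + 1)].filter
      (fun p => decide (0 ≤ p.1 ∧ p.1 < rows ∧ 0 ≤ p.2 ∧ p.2 < cols))).filterMap
    (fun p =>
      if (PySem.List.pyGet? ((PySem.List.pyGet? maze p.1).getD []) p.2).getD 0 = 1 then
        (if s.2.2 then some (p.1, p.2, false) else none)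
      else some (p.1, p.2, s.2.2))

-- one round of reachability closure
def pvGrowP (maze : List (List Int)) (rows cols : Int)
    (v : List (Int × Int × Bool)) : List (Int × Int × Bool) :=
  v.foldl (fun acc s =>
    (pvNbrsP maze rows cols s).foldl
      (fun acc2 t => if t ∈ acc2 then acc2 else acc2 ++ [t]) acc) v

-- goal reachable from (0,0,True): closure stabilises within 2·rows·cols rounds
def pvSolvable (maze : List (List Int)) : Bool :=
  let rows : Int := maze.length
  let cols : Int := maze.headI.length
  ((pvGrowP maze rows cols)^[2 * maze.length * maze.headI.length]
      [((0 : Int), (0 : Int), true)]).any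
    (fun s => decide (s.1 = rows - 1 ∧ s.2.1 = cols - 1))

-- Pre_ excludes exactly the inputs on which A raises: the empty maze and a zero-width first row
-- (len(maze[0]) / the sibling checks / the final pop raise), unsolvable mazes (pop from an empty
-- deque: IndexError), and ragged mazes (a row shorter than the first), where a neighbour
-- wall-check reads a missing cell and raises IndexError — on rare ragged mazes whose short rows
-- are never inspected A still returns (see the cite), and B returns the same value there.
def Pre_answer (maze : List (List Int)) : Prop :=
  maze ≠ [] ∧ maze.headI ≠ [] ∧ (∀ row ∈ maze, maze.headI.length ≤ row.length) ∧
    pvSolvable maze = true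
instance (maze : List (List Int)) : Decidable (Pre_answer maze) := by
  unfold Pre_answer; infer_instance

def pvWitness_answer : List (List Int) := [[0]]

def Spec_answer (maze : List (List Int)) (out : Int) : Prop := out = answer_alt maze
instance (maze : List (List Int)) (out : Int) : Decidable (Spec_answer maze out) := by
  unfold Spec_answer; infer_instance

-- ===== CLAIM (what is proved, stated in full; the proofs are below) =====
def Claim_equal_answer : Prop :=
  ∀ (maze : List (List Int)), Dom_answer maze → Pre_answer maze → Spec_answer maze (answer maze)

-- ===== LEMMAS AND PROOFS =====

-- a state inside the grid
def pvInR (rows cols : Int) (s : Int × Int × Bool) : Prop :=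
  0 ≤ s.1 ∧ s.1 < rows ∧ 0 ≤ s.2.1 ∧ s.2.1 < cols

-- all grid states (both flags)
def pvAllSt (R C : Nat) : List (Int × Int × Bool) :=
  (List.range R).flatMap fun i =>
    (List.range C).flatMap fun j => [((i : Int), (j : Int), true), ((i : Int), (j : Int), false)]

-- number of grid states not yet recorded in the distance dict
def pvFree (R C : Nat) (D : PySem.Dict (Int × Int × Bool) Int) : Nat :=
  ((pvAllSt R C).filter (fun s => D.get? s = none)).length

theorem pvAllSt_length (R C : Nat) : (pvAllSt R C).length = 2 * R * C := by
  induction R with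
  | zero => simp [pvAllSt]
  | succ r ih =>
    have : pvAllSt (r+1) C = pvAllSt r C ++
        ((List.range C).flatMap fun j => [((r : Int), (j : Int), true), ((r : Int), (j : Int), false)]) := by
      simp [pvAllSt, List.range_succ]
    rw [this, List.length_append, ih, List.length_flatMap]
    have h2 : ∀ n : Nat, (((List.range n).map fun j =>
        ([((r : Int), (j : Int), true), ((r : Int), (j : Int), false)] : List (Int × Int × Bool)).length).sum) = 2 * n := by
      intro n; induction n with
      | zero => simp
      | succ m ihm => simp [List.range_succ]; ring
    rw [h2]; ring

theorem pvMemAll {R C : Nat} {s : Int × Int × Bool}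
    (h : pvInR (R : Int) (C : Int) s) : s ∈ pvAllSt R C := by
  obtain ⟨r, c, b⟩ := s
  obtain ⟨h1, h2, h3, h4⟩ := h
  simp only at h1 h2 h3 h4
  simp [pvAllSt, List.mem_flatMap, List.mem_range, Prod.ext_iff]
  cases b
  · exact ⟨r.toNat, by omega, c.toNat, by omega, Or.inr ⟨by omega, by omega, rfl⟩⟩
  · exact ⟨r.toNat, by omega, c.toNat, by omega, Or.inl ⟨by omega, by omega, rfl⟩⟩

-- membership in one conditional direction block of sibsA
theorem pvMemCond {α : Type} {g w cn : Prop} [Decidable g] [Decidable w] [Decidable cn]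
    {x y : α} {t : List α} {s : α}
    (h : s ∈ (if g then (if w then (if cn then x :: t else t) else y :: t) else t)) :
    (g ∧ (s = x ∨ s = y)) ∨ s ∈ t := by
  split_ifs at h <;> (try simp only [List.mem_cons] at h) <;> tauto

theorem pvSibsA_inR {maze : List (List Int)} {rows cols : Int} {st s : Int × Int × Bool}
    (hst : pvInR rows cols st) (hs : s ∈ sibsA maze (cols - 1) (rows - 1) st) :
    pvInR rows cols s := by
  obtain ⟨r, c, can⟩ := st
  obtain ⟨h1, h2, h3, h4⟩ := hst
  simp only at h1 h2 h3 h4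
  unfold sibsA at hs
  simp only at hs
  rcases pvMemCond hs with ⟨hg, h⟩ | hs
  · rcases h with h | h <;> (subst h; simp [pvInR]; omega)
  rcases pvMemCond hs with ⟨hg, h⟩ | hs
  · rcases h with h | h <;> (subst h; simp [pvInR]; omega)
  rcases pvMemCond hs with ⟨hg, h⟩ | hs
  · rcases h with h | h <;> (subst h; simp [pvInR]; omega)
  rcases pvMemCond hs with ⟨hg, h⟩ | hs
  · rcases h with h | h <;> (subst h; simp [pvInR]; omega)
  simp at hs

theorem pvCountP_lt {α : Type} (l : List α) (p q : α → Bool) (s : α) (hs : s ∈ l)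
    (hps : p s = true) (hqs : q s = false) (hpq : ∀ t, t ≠ s → q t = p t) :
    l.countP q < l.countP p := by
  induction l with
  | nil => simp at hs
  | cons a l ih =>
    have hmono : l.countP q ≤ l.countP p := by
      apply List.countP_mono_left
      intro t _ hqt
      by_cases hts : t = s
      · rw [hts] at hqt; simp [hqs] at hqt
      · rw [← hpq t hts]; exact hqt
    by_cases ha : a = s
    · rw [List.countP_cons, List.countP_cons, ha]; simp [hps, hqs]
      omega
    · rcases List.mem_cons.1 hs with h | h
      · exact absurd h.symm ha
      · have := ih h
        rw [List.countP_cons, List.countP_cons, hpq a ha]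
        omega

-- the dict component of A's sibling fold ignores the queue component,
-- and the queue only ever grows on the right
theorem pvStepA_split (cur : Int × Int × Bool) (ss : List (Int × Int × Bool)) :
    ∀ (Pa P : List (Int × Int × Bool)) (D : PySem.Dict (Int × Int × Bool) Int),
      ss.foldl (pvStepA cur) (Pa ++ P, D) =
        (Pa ++ (ss.foldl (pvStepA cur) (P, D)).1, (ss.foldl (pvStepA cur) (P, D)).2) := by
  induction ss with
  | nil => intro Pa P D; simp
  | cons s0 ss ih =>
    intro Pa P D
    simp only [List.foldl_cons]
    by_cases h : D.get? s0 = none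
    · simp only [pvStepA, h]
      rw [List.append_assoc]
      exact ih Pa (P ++ [s0]) _
    · simp only [pvStepA, h]
      exact ih Pa P D

-- full characterisation of A's per-node sibling fold
theorem pvStepA_char (R C : Nat) (ss : List (Int × Int × Bool)) :
    ∀ (P : List (Int × Int × Bool)) (D : PySem.Dict (Int × Int × Bool) Int)
      (cur : Int × Int × Bool) (d : Int),
      D.get? cur = some d → (∀ s ∈ ss, s ∈ pvAllSt R C) →
      (∀ t v, D.get? t = some v → (ss.foldl (pvStepA cur) (P, D)).2.get? t = some v) ∧
      (∀ t, (ss.foldl (pvStepA cur) (P, D)).2.get? t ≠ none ↔ (D.get? t ≠ none ∨ t ∈ ss)) ∧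
      (∀ p ∈ (ss.foldl (pvStepA cur) (P, D)).1,
        p ∈ P ∨ (p ∈ ss ∧ D.get? p = none ∧
          (ss.foldl (pvStepA cur) (P, D)).2.get? p = some (d + 1))) ∧
      (∀ t, D.get? t = none → (ss.foldl (pvStepA cur) (P, D)).2.get? t ≠ none →
        t ∈ (ss.foldl (pvStepA cur) (P, D)).1) ∧
      (∀ p ∈ P, p ∈ (ss.foldl (pvStepA cur) (P, D)).1) ∧
      pvFree R C (ss.foldl (pvStepA cur) (P, D)).2 +
        (ss.foldl (pvStepA cur) (P, D)).1.length ≤ pvFree R C D + P.length := by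
  induction ss with
  | nil =>
    intro P D cur d hcur hss
    refine ⟨fun t v h => h, by simp, fun p hp => Or.inl hp, ?_, fun p hp => hp, le_refl _⟩
    intro t h1 h2; exact absurd h1 h2
  | cons s0 ss ih =>
    intro P D cur d hcur hss
    simp only [List.foldl_cons]
    by_cases hmem : D.get? s0 = none
    · have hne : cur ≠ s0 := by
        intro e; rw [e, hmem] at hcur; simp at hcur
      have hA : pvStepA cur (P, D) s0 = (P ++ [s0], D.insert s0 (d + 1)) := by
        simp [pvStepA, hmem, PySem.Dict.getD_of_get?_eq_some D 0 hcur]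
      rw [hA]
      have hcur' : (D.insert s0 (d + 1)).get? cur = some d := by
        rw [PySem.Dict.get?_insert_of_ne D (d + 1) hne]; exact hcur
      have hfree : pvFree R C (D.insert s0 (d + 1)) < pvFree R C D := by
        unfold pvFree
        rw [← List.countP_eq_length_filter, ← List.countP_eq_length_filter]
        refine pvCountP_lt _ _ _ s0 (hss s0 List.mem_cons_self) (by simp [hmem]) ?_ ?_
        · simp
        · intro t ht
          simp [PySem.Dict.get?_insert_of_ne D (d + 1) ht]
      obtain ⟨i1, i2, i3, i4, i5, i6⟩ :=
        ih (P ++ [s0]) (D.insert s0 (d + 1)) cur d hcur'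
          (fun t ht => hss t (List.mem_cons_of_mem _ ht))
      refine ⟨?_, ?_, ?_, ?_, ?_, ?_⟩
      · intro t v hv
        refine i1 t v ?_
        have htne : t ≠ s0 := by intro e; rw [e, hmem] at hv; simp at hv
        rw [PySem.Dict.get?_insert_of_ne D (d + 1) htne]; exact hv
      · intro t
        rw [i2 t, PySem.Dict.get?_insert]
        by_cases ht : t = s0 <;> simp [ht]
      · intro p hp
        rcases i3 p hp with hin | ⟨hmemss, hnone, hval⟩
        · rcases List.mem_append.1 hin with h | h
          · exact Or.inl h
          · right
            have : p = s0 := by simpa using h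
            subst this
            exact ⟨List.mem_cons_self, hmem,
              i1 p (d + 1) (by rw [PySem.Dict.get?_insert]; simp)⟩
        · have hpne : p ≠ s0 := by
            intro e; rw [e] at hnone
            rw [PySem.Dict.get?_insert] at hnone; simp at hnone
          right
          refine ⟨List.mem_cons_of_mem _ hmemss, ?_, hval⟩
          rw [PySem.Dict.get?_insert_of_ne D (d + 1) hpne] at hnone; exact hnone
      · intro t h1 h2
        by_cases ht : t = s0
        · subst ht
          exact i5 t (by simp)
        · refine i4 t ?_ h2
          rw [PySem.Dict.get?_insert_of_ne D (d + 1) ht]; exact h1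
      · intro p hp
        exact i5 p (List.mem_append.2 (Or.inl hp))
      · have := List.length_append (as := P) (bs := [s0])
        simp only [List.length_append, List.length_singleton] at i6
        omega
    · rw [show pvStepA cur (P, D) s0 = (P, D) by simp [pvStepA, hmem]]
      obtain ⟨i1, i2, i3, i4, i5, i6⟩ :=
        ih P D cur d hcur (fun t ht => hss t (List.mem_cons_of_mem _ ht))
      refine ⟨i1, ?_, ?_, i4, i5, i6⟩
      · intro t
        rw [i2 t]
        constructor
        · rintro (h | h)
          · exact Or.inl h
          · exact Or.inr (List.mem_cons_of_mem _ h)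
        · rintro (h | h)
          · exact Or.inl h
          · rcases List.mem_cons.1 h with h | h
            · subst h; exact Or.inl hmem
            · exact Or.inr h
      · intro p hp
        rcases i3 p hp with h | ⟨h1, h2, h3⟩
        · exact Or.inl h
        · exact Or.inr ⟨List.mem_cons_of_mem _ h1, h2, h3⟩

-- proof-side driver for one whole level of A's loop
def pvProcA (maze : List (List Int)) (rows cols : Int) :
    List (Int × Int × Bool) → List (Int × Int × Bool) →
    PySem.Dict (Int × Int × Bool) Int →
    Option (List (Int × Int × Bool) × PySem.Dict (Int × Int × Bool) Int)
  | [], P, D => some (P, D)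
  | c :: F', P, D =>
    if c.1 = rows - 1 ∧ c.2.1 = cols - 1 then none
    else
      let E := (sibsA maze (cols - 1) (rows - 1) c).foldl (pvStepA c) (P, D)
      pvProcA maze rows cols F' E.1 E.2

-- unfolding equations for goA
theorem goA_nil (maze : List (List Int)) (W L : Int) (fuel : Nat)
    (dist : PySem.Dict (Int × Int × Bool) Int) : goA maze W L fuel [] dist = 0 := by
  cases fuel <;> rfl

theorem goA_goal (maze : List (List Int)) (W L : Int) (fuel : Nat)
    (cur : Int × Int × Bool) (q : List (Int × Int × Bool))
    (dist : PySem.Dict (Int × Int × Bool) Int) (h : cur.1 = L ∧ cur.2.1 = W) :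
    goA maze W L fuel (cur :: q) dist = dist.getD cur 0 := by
  cases fuel <;> simp [goA, h]

theorem goA_step (maze : List (List Int)) (W L : Int) (f : Nat)
    (cur : Int × Int × Bool) (q : List (Int × Int × Bool))
    (dist : PySem.Dict (Int × Int × Bool) Int) (h : ¬ (cur.1 = L ∧ cur.2.1 = W)) :
    goA maze W L (f + 1) (cur :: q) dist =
      goA maze W L f ((sibsA maze W L cur).foldl (pvStepA cur) (q, dist)).1
        ((sibsA maze W L cur).foldl (pvStepA cur) (q, dist)).2 := by
  simp [goA, h]

-- a goal state in the queue means A returns within this level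
theorem pvProcA_none (maze : List (List Int)) (rows cols : Int)
    (g : Int × Int × Bool) (hg : g.1 = rows - 1 ∧ g.2.1 = cols - 1) :
    ∀ (F P : List (Int × Int × Bool)) (D : PySem.Dict (Int × Int × Bool) Int),
      g ∈ F → pvProcA maze rows cols F P D = none := by
  intro F
  induction F with
  | nil => intro P D h; simp at h
  | cons c F' ih =>
    intro P D h
    by_cases hc : c.1 = rows - 1 ∧ c.2.1 = cols - 1
    · simp [pvProcA, hc]
    · have : g ∈ F' := by
        rcases List.mem_cons.1 h with h | h
        · subst h; exact absurd hg hc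
        · exact h
      simp only [pvProcA, if_neg hc]
      exact ih _ _ this

-- no goal state in the queue: A finishes the level
theorem pvProcA_some (maze : List (List Int)) (rows cols : Int) :
    ∀ (F P : List (Int × Int × Bool)) (D : PySem.Dict (Int × Int × Bool) Int),
      (∀ c ∈ F, ¬ (c.1 = rows - 1 ∧ c.2.1 = cols - 1)) →
      ∃ P' D', pvProcA maze rows cols F P D = some (P', D') := by
  intro F
  induction F with
  | nil => intro P D _; exact ⟨P, D, rfl⟩
  | cons c F' ih =>
    intro P D h
    have hc := h c List.mem_cons_self
    simp only [pvProcA, if_neg hc]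
    exact ih _ _ (fun c' hc' => h c' (List.mem_cons_of_mem _ hc'))

-- processing one whole level of A's queue
theorem pvLevelA (maze : List (List Int)) (rows cols : Int) (R C : Nat)
    (hR : rows = (R : Int)) (hC : cols = (C : Int)) :
    ∀ (F P : List (Int × Int × Bool)) (D : PySem.Dict (Int × Int × Bool) Int)
      (d : Int) (fA : Nat),
      (∀ c ∈ F, D.get? c = some d ∧ pvInR rows cols c) →
      (∀ p ∈ P, D.get? p = some (d + 1) ∧ pvInR rows cols p) →
      (match pvProcA maze rows cols F P D with
       | none => goA maze (cols - 1) (rows - 1) (F.length + fA) (F ++ P) D = d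
       | some (P', D') =>
           goA maze (cols - 1) (rows - 1) (F.length + fA) (F ++ P) D =
             goA maze (cols - 1) (rows - 1) fA P' D' ∧
           (∀ t v, D.get? t = some v → D'.get? t = some v) ∧
           (∀ t, D'.get? t ≠ none ↔
             (D.get? t ≠ none ∨ ∃ c ∈ F, t ∈ sibsA maze (cols - 1) (rows - 1) c)) ∧
           (∀ p ∈ P', D'.get? p = some (d + 1) ∧ pvInR rows cols p) ∧
           (∀ t, D.get? t = none → D'.get? t ≠ none → t ∈ P') ∧
           (∀ p ∈ P', p ∈ P ∨ D.get? p = none) ∧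
           (∀ p ∈ P, p ∈ P') ∧
           pvFree R C D' + P'.length ≤ pvFree R C D + P.length) := by
  intro F
  induction F with
  | nil =>
    intro P D d fA hF hP
    simp only [pvProcA, List.nil_append, List.length_nil, Nat.zero_add]
    refine ⟨by trivial, fun t v h => h, fun t => ?_, hP, fun t h1 h2 => absurd h1 h2,
      fun p hp => Or.inl hp, fun p hp => hp, le_refl _⟩
    constructor
    · exact fun h => Or.inl h
    · rintro (h | ⟨c, hc, _⟩)
      · exact h
      · simp at hc
  | cons c F' ih =>
    intro P D d fA hF hP
    have hcval := (hF c List.mem_cons_self).1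
    have hcin := (hF c List.mem_cons_self).2
    by_cases hgoal : c.1 = rows - 1 ∧ c.2.1 = cols - 1
    · simp only [pvProcA, if_pos hgoal]
      rw [List.cons_append, goA_goal _ _ _ _ _ _ _ hgoal]
      exact PySem.Dict.getD_of_get?_eq_some D 0 hcval
    · have hlen : (c :: F').length + fA = (F'.length + fA) + 1 := by
        simp [List.length_cons]; omega
      rw [List.cons_append, hlen, goA_step _ _ _ _ _ _ _ hgoal]
      rw [pvStepA_split c _ F' P D]
      have hss : ∀ s ∈ sibsA maze (cols - 1) (rows - 1) c, s ∈ pvAllSt R C := by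
        intro s hs
        have := pvSibsA_inR hcin hs
        rw [hR, hC] at this
        exact pvMemAll this
      obtain ⟨i1, i2, i3, i4, i5, i6⟩ :=
        pvStepA_char R C (sibsA maze (cols - 1) (rows - 1) c) P D c d hcval hss
      set E := (sibsA maze (cols - 1) (rows - 1) c).foldl (pvStepA c) (P, D) with hE
      have hF2 : ∀ c' ∈ F', E.2.get? c' = some d ∧ pvInR rows cols c' :=
        fun c' hc' => ⟨i1 c' d ((hF c' (List.mem_cons_of_mem _ hc')).1),
          (hF c' (List.mem_cons_of_mem _ hc')).2⟩
      have hP2 : ∀ p ∈ E.1, E.2.get? p = some (d + 1) ∧ pvInR rows cols p := by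
        intro p hp
        rcases i3 p hp with hin | ⟨hmemss, _, hval⟩
        · exact ⟨i1 p (d + 1) (hP p hin).1, (hP p hin).2⟩
        · exact ⟨hval, pvSibsA_inR hcin hmemss⟩
      have hproc : pvProcA maze rows cols (c :: F') P D = pvProcA maze rows cols F' E.1 E.2 := by
        simp only [pvProcA, if_neg hgoal]
        rfl
      have := ih E.1 E.2 d fA hF2 hP2
      rw [hproc]
      rcases hres : pvProcA maze rows cols F' E.1 E.2 with _ | ⟨P', D'⟩
      · rw [hres] at this
        exact this
      · rw [hres] at this
        obtain ⟨j1, j2, j3, j4, j5, j6, j7, j8⟩ := this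
        refine ⟨j1, ?_, ?_, j4, ?_, ?_, ?_, ?_⟩
        · intro t v hv; exact j2 t v (i1 t v hv)
        · intro t
          rw [j3 t]
          constructor
          · rintro (h | ⟨c', hc', ht⟩)
            · rcases (i2 t).1 h with h | h
              · exact Or.inl h
              · exact Or.inr ⟨c, List.mem_cons_self, h⟩
            · exact Or.inr ⟨c', List.mem_cons_of_mem _ hc', ht⟩
          · rintro (h | ⟨c', hc', ht⟩)
            · exact Or.inl ((i2 t).2 (Or.inl h))
            · rcases List.mem_cons.1 hc' with h | h
              · subst h; exact Or.inl ((i2 t).2 (Or.inr ht))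
              · exact Or.inr ⟨c', h, ht⟩
        · intro t h1 h2
          by_cases hE2 : E.2.get? t = none
          · exact j5 t hE2 h2
          · exact j7 t (i4 t h1 hE2)
        · intro p hp
          rcases j6 p hp with h | h
          · rcases i3 p h with h' | ⟨_, h', _⟩
            · exact Or.inl h'
            · exact Or.inr h'
          · right
            rcases hD : D.get? p with _ | v
            · rfl
            · exact absurd (i1 p v hD) (by simp [h])
        · intro p hp
          exact j7 p (i5 p hp)
        · omega

-- membership in one conditional layer of grow's inner fold
theorem pvMemLayer {g w cn : Prop} [Decidable g] [Decidable w] [Decidable cn]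
    (x y : Int × Int × Bool) (out : PySem.Set (Int × Int × Bool)) (t : Int × Int × Bool) :
    t ∈ (if g then (if w then (if cn then PySem.Set.add out x else out)
          else PySem.Set.add out y) else out) ↔
      t ∈ out ∨ (g ∧ ((w ∧ cn ∧ t = x) ∨ (¬ w ∧ t = y))) := by
  split_ifs <;> simp [PySem.Set.mem_add] <;> tauto

-- membership in one conditional layer of sibsA
theorem pvMemLayerCons {α : Type} {g w cn : Prop} [Decidable g] [Decidable w] [Decidable cn]
    (x y : α) (tl : List α) (t : α) :
    t ∈ (if g then (if w then (if cn then x :: tl else tl) else y :: tl) else tl) ↔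
      t ∈ tl ∨ (g ∧ ((w ∧ cn ∧ t = x) ∨ (¬ w ∧ t = y))) := by
  split_ifs <;> simp <;> tauto

-- membership after adding one state's four moves
theorem pvGrowStep_mem (maze : List (List Int)) (rows cols : Int)
    (out : PySem.Set (Int × Int × Bool)) (st : Int × Int × Bool)
    (hst : pvInR rows cols st) (t : Int × Int × Bool) :
    t ∈ pvGrowStep maze rows cols out st ↔
      t ∈ out ∨ t ∈ sibsA maze (cols - 1) (rows - 1) st := by
  obtain ⟨r, c, can⟩ := st
  obtain ⟨h1, h2, h3, h4⟩ := hst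
  simp only at h1 h2 h3 h4
  have b1 : (0 ≤ r - 1 ∧ r - 1 < rows ∧ 0 ≤ c ∧ c < cols) ↔ r > 0 := by omega
  have b2 : (0 ≤ r + 1 ∧ r + 1 < rows ∧ 0 ≤ c ∧ c < cols) ↔ r < rows - 1 := by omega
  have b3 : (0 ≤ r ∧ r < rows ∧ 0 ≤ c - 1 ∧ c - 1 < cols) ↔ c > 0 := by omega
  have b4 : (0 ≤ r ∧ r < rows ∧ 0 ≤ c + 1 ∧ c + 1 < cols) ↔ c < cols - 1 := by omega
  simp only [pvGrowStep, sibsA, pvCellA, pvCellB, List.foldl_cons, List.foldl_nil]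
  simp only [b1, b2, b3, b4]
  simp only [pvMemLayer, pvMemLayerCons, List.not_mem_nil]
  simp only [false_or, or_assoc]

-- membership in grow(reach)
theorem pvGrowB_mem (maze : List (List Int)) (rows cols : Int)
    (reach : PySem.Set (Int × Int × Bool))
    (hin : ∀ s ∈ reach, pvInR rows cols s) (t : Int × Int × Bool) :
    t ∈ pvGrowB maze rows cols reach ↔
      t ∈ reach ∨ ∃ s ∈ reach, t ∈ sibsA maze (cols - 1) (rows - 1) s := by
  unfold pvGrowB
  have main : ∀ (l : List (Int × Int × Bool)) (out : PySem.Set (Int × Int × Bool)),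
      (∀ s ∈ l, pvInR rows cols s) →
      (t ∈ l.foldl (pvGrowStep maze rows cols) out ↔
        t ∈ out ∨ ∃ s ∈ l, t ∈ sibsA maze (cols - 1) (rows - 1) s) := by
    intro l
    induction l with
    | nil => intro out _; simp
    | cons s0 l ih =>
      intro out hl
      simp only [List.foldl_cons]
      rw [ih _ (fun s hs => hl s (List.mem_cons_of_mem _ hs)),
        pvGrowStep_mem maze rows cols out s0 (hl s0 List.mem_cons_self) t]
      constructor
      · rintro ((h | h) | ⟨s, hs, ht⟩)
        · exact Or.inl h
        · exact Or.inr ⟨s0, List.mem_cons_self, h⟩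
        · exact Or.inr ⟨s, List.mem_cons_of_mem _ hs, ht⟩
      · rintro (h | ⟨s, hs, ht⟩)
        · exact Or.inl (Or.inl h)
        · rcases List.mem_cons.1 hs with h | h
          · subst h; exact Or.inl (Or.inr ht)
          · exact Or.inr ⟨s, h, ht⟩
  rw [main reach (PySem.Set.ofList reach) hin]
  rw [PySem.Set.mem_ofList]

-- the two loops agree from any level boundary on
theorem pvMain (maze : List (List Int)) (rows cols : Int) (R C : Nat)
    (hR : rows = (R : Int)) (hC : cols = (C : Int)) :
    ∀ (n : Nat) (D : PySem.Dict (Int × Int × Bool) Int)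
      (Rh : PySem.Set (Int × Int × Bool)) (F : List (Int × Int × Bool)) (k : Int)
      (fA fB : Nat),
      pvFree R C D = n →
      (∀ s : Int × Int × Bool, D.get? s ≠ none ↔ s ∈ Rh) →
      (∀ c ∈ F, D.get? c = some k ∧ pvInR rows cols c) →
      (∀ s : Int × Int × Bool, D.get? s ≠ none → pvInR rows cols s) →
      (∀ s : Int × Int × Bool, D.get? s ≠ none → s ∉ F →
        ∀ t ∈ sibsA maze (cols - 1) (rows - 1) s, D.get? t ≠ none) →
      (∀ b : Bool, D.get? (rows - 1, cols - 1, b) ≠ none → ((rows - 1, cols - 1, b) : Int × Int × Bool) ∈ F) →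
      F.length + 2 * pvFree R C D ≤ fA → pvFree R C D < fB →
      goA maze (cols - 1) (rows - 1) fA F D = pvLoopB maze rows cols fB Rh k := by
  intro n
  induction n using Nat.strong_induction_on with
  | _ n ih =>
    intro D Rh F k fA fB hn hRel hF hKeyIn hClos hGoalF hfa hfb
    by_cases hgoal : ((rows - 1, cols - 1, true) : Int × Int × Bool) ∈ Rh ∨
        ((rows - 1, cols - 1, false) : Int × Int × Bool) ∈ Rh
    · -- B returns k immediately; A pops a goal state within this level
      have hBk : pvLoopB maze rows cols fB Rh k = k := by
        cases fB <;> simp [pvLoopB, hgoal]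
      rw [hBk]
      obtain ⟨b, hb⟩ : ∃ b : Bool, ((rows - 1, cols - 1, b) : Int × Int × Bool) ∈ Rh := by
        rcases hgoal with h | h
        exacts [⟨true, h⟩, ⟨false, h⟩]
      have hgF : ((rows - 1, cols - 1, b) : Int × Int × Bool) ∈ F :=
        hGoalF b ((hRel _).2 hb)
      have hnone := pvProcA_none maze rows cols (rows - 1, cols - 1, b) ⟨rfl, rfl⟩ F [] D hgF
      have hlev := pvLevelA maze rows cols R C hR hC F [] D k (fA - F.length) hF (by simp)
      rw [hnone] at hlev
      have hlenfa : F.length + (fA - F.length) = fA := by omega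
      rw [hlenfa, List.append_nil] at hlev
      exact hlev
    · -- no goal reached yet: both sides advance one level
      have hnoF : ∀ c ∈ F, ¬ (c.1 = rows - 1 ∧ c.2.1 = cols - 1) := by
        rintro ⟨r0, c0, b⟩ hc ⟨e1, e2⟩
        simp only at e1 e2
        subst e1; subst e2
        have hmem : ((rows - 1, cols - 1, b) : Int × Int × Bool) ∈ Rh :=
          (hRel _).1 (by simp [(hF _ hc).1])
        cases b
        · exact hgoal (Or.inr hmem)
        · exact hgoal (Or.inl hmem)
      obtain ⟨P', D', hproc⟩ := pvProcA_some maze rows cols F [] D hnoF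
      have hlev := pvLevelA maze rows cols R C hR hC F [] D k (fA - F.length) hF (by simp)
      rw [hproc] at hlev
      obtain ⟨j1, j2, j3, j4, j5, j6, j7, j8⟩ := hlev
      have hlenfa : F.length + (fA - F.length) = fA := by omega
      rw [hlenfa, List.append_nil] at j1
      simp only [List.length_nil, Nat.add_zero] at j8
      have hRin : ∀ s ∈ Rh, pvInR rows cols s := fun s hs => hKeyIn s ((hRel s).2 hs)
      have hgrow : ∀ t, t ∈ pvGrowB maze rows cols Rh ↔ D'.get? t ≠ none := by
        intro t
        rw [pvGrowB_mem maze rows cols Rh hRin t, j3 t]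
        constructor
        · rintro (h | ⟨s, hs, ht⟩)
          · exact Or.inl ((hRel t).2 h)
          · by_cases hsF : s ∈ F
            · exact Or.inr ⟨s, hsF, ht⟩
            · exact Or.inl (hClos s ((hRel s).2 hs) hsF t ht)
        · rintro (h | ⟨c, hc, ht⟩)
          · exact Or.inl ((hRel t).1 h)
          · exact Or.inr ⟨c, (hRel c).1 (by simp [(hF c hc).1]), ht⟩
      cases fB with
      | zero => omega
      | succ fb =>
        by_cases heq : PySem.Set.equal (pvGrowB maze rows cols Rh) Rh = true
        · -- fixpoint reached without the goal: Python A raises IndexError, B ValueError (both 0)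
          have hsame : ∀ x, x ∈ pvGrowB maze rows cols Rh ↔ x ∈ Rh :=
            (PySem.Set.equal_iff _ _).1 heq
          have hP' : P' = [] := by
            cases hcase : P' with
            | nil => rfl
            | cons p ps =>
              exfalso
              have hp : p ∈ P' := by rw [hcase]; simp
              rcases j6 p hp with h | h
              · simp at h
              · have hD'p : D'.get? p ≠ none := by simp [(j4 p hp).1]
                have hpg : p ∈ pvGrowB maze rows cols Rh := (hgrow p).2 hD'p
                exact absurd ((hRel p).2 ((hsame p).1 hpg)) (by simp [h])
          rw [j1, hP', goA_nil]
          cases fb <;> simp [pvLoopB, hgoal, heq]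
        · -- progress: the reached set strictly grows
          have hsub : ∀ x ∈ Rh, x ∈ pvGrowB maze rows cols Rh := by
            intro x hx
            rw [pvGrowB_mem maze rows cols Rh hRin x]
            exact Or.inl hx
          obtain ⟨x, hxg, hxR⟩ : ∃ x, x ∈ pvGrowB maze rows cols Rh ∧ x ∉ Rh := by
            by_contra hco
            refine heq ((PySem.Set.equal_iff _ _).2 (fun x => ⟨fun h => ?_, hsub x⟩))
            by_contra hxR
            exact hco ⟨x, h, hxR⟩
          have hxD' : D'.get? x ≠ none := (hgrow x).1 hxg
          have hxD : D.get? x = none := by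
            rcases hD : D.get? x with _ | v
            · rfl
            · exact absurd ((hRel x).1 (by simp [hD])) hxR
          have hxP' : x ∈ P' := j5 x hxD hxD'
          have hP'len : 1 ≤ P'.length := by
            cases P' with
            | nil => simp at hxP'
            | cons _ _ => simp
          have hfreelt : pvFree R C D' < pvFree R C D := by omega
          have hBstep : pvLoopB maze rows cols (fb + 1) Rh k =
              pvLoopB maze rows cols fb (pvGrowB maze rows cols Rh) (k + 1) := by
            conv_lhs => rw [pvLoopB]
            simp [hgoal, heq]
          rw [hBstep, j1]
          refine ih (pvFree R C D') (hn ▸ hfreelt) D' (pvGrowB maze rows cols Rh) P' (k + 1)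
            (fA - F.length) fb rfl ?_ j4 ?_ ?_ ?_ ?_ ?_
          · intro s
            exact (hgrow s).symm
          · intro s hs
            rcases (j3 s).1 hs with h | ⟨c, hc, hcs⟩
            · exact hKeyIn s h
            · exact pvSibsA_inR (hF c hc).2 hcs
          · intro s hsD' hsP' t ht
            by_cases hsD : D.get? s = none
            · exact absurd (j5 s hsD hsD') hsP'
            · by_cases hsF : s ∈ F
              · exact (j3 t).2 (Or.inr ⟨s, hsF, ht⟩)
              · exact (j3 t).2 (Or.inl (hClos s hsD hsF t ht))
          · intro b hb
            by_cases hD : D.get? (rows - 1, cols - 1, b) = none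
            · exact j5 _ hD hb
            · exfalso
              have hmem : ((rows - 1, cols - 1, b) : Int × Int × Bool) ∈ Rh := (hRel _).1 hD
              cases b
              · exact hgoal (Or.inr hmem)
              · exact hgoal (Or.inl hmem)
          · omega
          · omega

-- ===== VERDICT helpers =====
theorem pvRow0 (maze : List (List Int)) (h : maze ≠ []) :
    (PySem.List.pyGet? maze 0).getD [] = maze.headI := by
  cases maze with
  | nil => exact absurd rfl h
  | cons a l => simp [PySem.List.pyGet?, PySem.List.pyIdx?]

theorem answer_spec : Claim_equal_answer := by
  intro maze hdom hpre
  obtain ⟨hne, hhead, hrect, hsolv⟩ := hpre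
  unfold Spec_answer
  have hRpos : 0 < maze.length := List.length_pos_iff.2 hne
  have hCpos : 0 < maze.headI.length := List.length_pos_iff.2 hhead
  unfold answer answer_alt
  rw [pvRow0 maze hne]
  have hD : PySem.Dict.ofList [((((0:Int),(0:Int),true) : Int × Int × Bool), (1:Int))] =
      PySem.Dict.empty.insert ((0:Int),(0:Int),true) 1 := by decide
  have hget0 : (PySem.Dict.ofList [((((0:Int),(0:Int),true) : Int × Int × Bool), (1:Int))]).get?
      ((0:Int),(0:Int),true) = some 1 := by decide
  have hgetnone : ∀ s : Int × Int × Bool, s ≠ ((0:Int),(0:Int),true) →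
      (PySem.Dict.ofList [((((0:Int),(0:Int),true) : Int × Int × Bool), (1:Int))]).get? s = none := by
    intro s hs
    rw [hD, PySem.Dict.get?_insert]
    simp [hs, PySem.Dict.get?_empty]
  have hfree_le : pvFree maze.length maze.headI.length
      (PySem.Dict.ofList [((((0:Int),(0:Int),true) : Int × Int × Bool), (1:Int))]) ≤
        2 * maze.length * maze.headI.length := by
    unfold pvFree
    calc ((pvAllSt maze.length maze.headI.length).filter _).length
        ≤ (pvAllSt maze.length maze.headI.length).length := List.length_filter_le _ _
      _ = 2 * maze.length * maze.headI.length := pvAllSt_length _ _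
  have hstartmem : (((0:Int),(0:Int),true) : Int × Int × Bool) ∈
      PySem.Set.ofList [(((0:Int),(0:Int),true) : Int × Int × Bool)] := by decide
  refine pvMain maze (maze.length : Int) (maze.headI.length : Int) maze.length maze.headI.length
    rfl rfl (pvFree maze.length maze.headI.length
      (PySem.Dict.ofList [((((0:Int),(0:Int),true) : Int × Int × Bool), (1:Int))]))
    (PySem.Dict.ofList [((((0:Int),(0:Int),true) : Int × Int × Bool), (1:Int))])
    (PySem.Set.ofList [(((0:Int),(0:Int),true) : Int × Int × Bool)])
    [((0:Int),(0:Int),true)] 1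
    (4 * maze.length * maze.headI.length + 1) (2 * maze.length * maze.headI.length + 1)
    rfl ?_ ?_ ?_ ?_ ?_ ?_ ?_
  · intro s
    by_cases hs : s = ((0:Int),(0:Int),true)
    · subst hs
      simp [hget0, hstartmem]
    · rw [hgetnone s hs]
      simp [PySem.Set.mem_ofList]
      exact fun h => absurd h hs
  · intro c hc
    have : c = ((0:Int),(0:Int),true) := by simpa using hc
    subst this
    refine ⟨hget0, ?_⟩
    refine ⟨le_refl _, ?_, le_refl _, ?_⟩ <;> simp <;> omega
  · intro s hs
    by_cases h : s = ((0:Int),(0:Int),true)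
    · subst h
      refine ⟨le_refl _, ?_, le_refl _, ?_⟩ <;> simp <;> omega
    · exact absurd (hgetnone s h) hs
  · intro s hs hsF t ht
    by_cases h : s = ((0:Int),(0:Int),true)
    · subst h
      simp at hsF
    · exact absurd (hgetnone s h) hs
  · intro b hb
    by_cases h : ((maze.length : Int) - 1, (maze.headI.length : Int) - 1, b) = (((0:Int),(0:Int),true) : Int × Int × Bool)
    · rw [h]
      simp
    · exact absurd (hgetnone _ h) hb
  · have h4 : 4 * maze.length * maze.headI.length =
        2 * (2 * maze.length * maze.headI.length) := by ring
    simp only [List.length_cons, List.length_nil]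
    omega
  · omega
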